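-- pv_equiv track=rewrite | github.com/ASSERT-KTH/Mokav | experiments/pynguin/c4b/return-lst/generated_tests/src_1169/9/src_1169.py | func
-- ===== SOURCE A (Python) =====
-- def func(*args):
-- 	ret_values = []
--
-- 	n = int(args[0])
-- 	x = 0
-- 	for j in range(2, n):
-- 	    x = (x + ((n - j) * j))
-- 	ret_values.append((((x + n) - 1) + n))
--
-- 	return ret_values
-- ===== SOURCE B (Python) =====
-- def func(*args):
--     n = int(args[0])
--     x = (n - 2) * (n - 1) * (n + 3) // 6 if n >= 2 else 0
--     return [x + 2 * n - 1]
-- ===== Notes on version B (the rewrite author's own statement) =====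
-- stated objective: faster
-- what changed: Replaces the O(n) summation loop over range(2, n) by a closed-form cubic polynomial divided by six, computed in constant time.
import Mathlib
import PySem

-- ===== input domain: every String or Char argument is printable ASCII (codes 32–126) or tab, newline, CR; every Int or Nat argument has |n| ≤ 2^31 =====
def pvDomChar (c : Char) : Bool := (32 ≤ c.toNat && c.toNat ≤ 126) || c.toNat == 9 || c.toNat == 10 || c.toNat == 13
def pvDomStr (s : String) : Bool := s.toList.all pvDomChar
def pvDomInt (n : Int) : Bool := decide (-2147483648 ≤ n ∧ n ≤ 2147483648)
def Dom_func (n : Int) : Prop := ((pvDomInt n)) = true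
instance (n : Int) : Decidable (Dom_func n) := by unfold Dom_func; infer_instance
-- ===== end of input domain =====

-- B replaces A's linear summation loop by a closed-form cubic polynomial divided by six (constant time).


-- ===== PORT A =====
def func (n : Int) : List Int :=
  let x : Int := (PySem.List.pyRange 2 n 1).foldl (fun x j => x + (n - j) * j) 0
  [x + n - 1 + n]

-- ===== PORT B =====
def func_alt (n : Int) : List Int :=
  let x : Int := if 2 ≤ n then PySem.Int.floordiv ((n - 2) * (n - 1) * (n + 3)) 6 else 0
  [x + 2 * n - 1]

-- ===== PRECONDITION & SPEC =====
def Spec_func (n : Int) (out : List Int) : Prop := out = func_alt n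
instance (n : Int) (out : List Int) : Decidable (Spec_func n out) := by unfold Spec_func; infer_instance

-- ===== CLAIM (what is proved, stated in full; the proofs are below) =====
def Claim_equal_func : Prop := ∀ (n : Int), Dom_func n → Spec_func n (func n)

-- ===== LEMMAS AND PROOFS =====

-- closed form of the partial sums of A's loop, multiplied by 6 to stay in ℤ
theorem pv_sum_closed (n : Int) : ∀ (k : Nat),
    6 * (List.range k).foldl (fun (x : Int) (i : Nat) => x + (n - (2 + (i : Int))) * (2 + (i : Int))) 0 =
      3 * n * ((k : Int) + 1) * ((k : Int) + 2) - 6 * n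
        - ((k : Int) + 1) * ((k : Int) + 2) * (2 * (k : Int) + 3) + 6 := by
  intro k
  induction k with
  | zero => simp; ring
  | succ k ih =>
      rw [List.range_succ, List.foldl_append]
      simp only [List.foldl_cons, List.foldl_nil]
      push_cast
      push_cast at ih
      linear_combination ih

theorem pv_loop_eq (n : Int) (h : 2 ≤ n) :
    (PySem.List.pyRange 2 n 1).foldl (fun x j => x + (n - j) * j) 0 =
      PySem.Int.floordiv ((n - 2) * (n - 1) * (n + 3)) 6 := by
  rw [PySem.List.pyRange_one, List.foldl_map]
  have hk : ((n - 2).toNat : Int) = n - 2 := Int.toNat_of_nonneg (by omega)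
  have hs := pv_sum_closed n (n - 2).toNat
  rw [hk] at hs
  have h6 : 6 * (List.range (n - 2).toNat).foldl
      (fun (x : Int) (i : Nat) => x + (n - (2 + (i : Int))) * (2 + (i : Int))) 0 =
      (n - 2) * (n - 1) * (n + 3) := by rw [hs]; ring
  rw [PySem.Int.floordiv_eq_ediv_of_pos (by norm_num), ← h6,
    Int.mul_ediv_cancel_left _ (by norm_num)]

-- ===== VERDICT (by name: the statement is the Claim_ definition above) =====
theorem func_spec : Claim_equal_func := by
  intro n _
  unfold Spec_func func func_alt
  by_cases h : 2 ≤ n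
  · rw [pv_loop_eq n h, if_pos h]
    simp; ring
  · rw [PySem.List.pyRange_one_eq_nil (by omega), if_neg h]
    simp; ring
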